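-- pv_equiv track=rewrite | github.com/kiranani/InterviewPrep | Python3/0544_Output_Contest_Matches.py | findContestMatch
-- ===== SOURCE A (Python) =====
-- def findContestMatch(n: int) -> str:
--     match_format = "({},{})"
--     q = [match_format.format(i + 1, n - i) for i in range(n >> 1)]
--     n >>= 1
--     while n > 1:
--         q = [match_format.format(q[i], q[n - i - 1]) for i in range(n >> 1)]
--         n >>= 1
--     return q[0]
-- ===== SOURCE B (Python) =====
-- def findContestMatch(n: int) -> str:
--     q = ["({},{})".format(i + 1, n - i) for i in range(n >> 1)]
--
--     def helper(q):
--         if len(q) <= 1: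
--             return q[0]
--         m = len(q)
--         return helper(["({},{})".format(q[i], q[m - 1 - i]) for i in range(m // 2)])
--
--     return helper(q)
-- ===== Notes on version B (the rewrite author's own statement) =====
-- stated objective: alternative
-- what changed: A's explicit while-loop that carries a separate shrinking counter n alongside the pair list is replaced by a divide-and-conquer recursive helper on the list itself (length-1 base case, recurse on the half-length paired list).
import Mathlib
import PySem

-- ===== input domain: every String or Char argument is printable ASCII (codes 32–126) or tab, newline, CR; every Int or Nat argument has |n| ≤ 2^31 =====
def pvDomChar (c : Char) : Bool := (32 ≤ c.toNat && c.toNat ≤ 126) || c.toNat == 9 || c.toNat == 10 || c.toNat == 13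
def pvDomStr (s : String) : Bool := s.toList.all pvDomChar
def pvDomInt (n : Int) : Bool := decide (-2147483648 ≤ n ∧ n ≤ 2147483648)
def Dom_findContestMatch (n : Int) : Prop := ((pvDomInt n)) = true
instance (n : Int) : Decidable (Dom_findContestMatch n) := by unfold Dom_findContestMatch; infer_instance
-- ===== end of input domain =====

-- B replaces A's explicit while-loop over a shrinking counter n by a divide-and-conquer
-- recursive helper on the list itself (objective: alternative decomposition, same cost).

-- ===== PORT A =====
-- while n > 1: q = [...]; n >>= 1   (n >> 1 = floor division by 2)
def findContestMatchLoopA (q : List String) (n : Int) : List String :=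
  if h : n > 1 then
    findContestMatchLoopA
      ((PySem.List.pyRange 0 (PySem.Int.floordiv n 2) 1).map fun i =>
        "(" ++ (PySem.List.pyGetD q i "") ++ "," ++ (PySem.List.pyGetD q (n - i - 1) "") ++ ")")
      (PySem.Int.floordiv n 2)
  else q
termination_by n.toNat
decreasing_by
  have h2 : PySem.Int.floordiv n 2 = n / 2 := PySem.Int.floordiv_eq_ediv_of_pos (by omega)
  simp [h2]
  omega

def findContestMatch (n : Int) : String :=
  let q := (PySem.List.pyRange 0 (PySem.Int.floordiv n 2) 1).map fun i =>
    "(" ++ PySem.Int.toStr (i + 1) ++ "," ++ PySem.Int.toStr (n - i) ++ ")"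
  -- q[0]: IndexError (q = []) is excluded by Pre_findContestMatch
  (PySem.List.pyGetD (findContestMatchLoopA q (PySem.Int.floordiv n 2)) 0 "")

-- ===== PORT B =====
def findContestMatchHelperB (q : List String) : String :=
  if q.length ≤ 1 then
    -- q[0]: IndexError on empty q is excluded by Pre_findContestMatch
    q.headD ""
  else
    findContestMatchHelperB
      ((List.range (q.length / 2)).map fun i =>
        "(" ++ q.getD i "" ++ "," ++ q.getD (q.length - 1 - i) "" ++ ")")
termination_by q.length
decreasing_by
  simp
  omega

def findContestMatch_alt (n : Int) : String :=
  findContestMatchHelperB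
    ((List.range ((PySem.Int.floordiv n 2).toNat)).map fun (i : Nat) =>
      "(" ++ PySem.Int.toStr ((i : Int) + 1) ++ "," ++ PySem.Int.toStr (n - (i : Int)) ++ ")")

-- ===== PRECONDITION & SPEC =====
-- For n ≤ 1 the pair list q is empty (n ≤ 0) or collapses to length < 1, and A's q[0]
-- raises IndexError (so does B); Pre_ admits exactly the n where A returns.
def Pre_findContestMatch (n : Int) : Prop := 2 ≤ n
instance (n : Int) : Decidable (Pre_findContestMatch n) := by unfold Pre_findContestMatch; infer_instance

def pvWitness_findContestMatch : Int := (4)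

def Spec_findContestMatch (n : Int) (out : String) : Prop := out = findContestMatch_alt n
instance (n : Int) (out : String) : Decidable (Spec_findContestMatch n out) := by unfold Spec_findContestMatch; infer_instance

-- ===== CLAIM (what is proved, stated in full; the proofs are below) =====
def Claim_equal_findContestMatch : Prop := ∀ (n : Int), Dom_findContestMatch n → Pre_findContestMatch n → Spec_findContestMatch n (findContestMatch n)

-- ===== LEMMAS AND PROOFS =====

-- the core bridge: A's loop, run with counter n = q.length ≥ 1, computes B's helper
theorem map_pyRange_cast {α : Type} (k : Nat) (f : Int → α) :
    (PySem.List.pyRange 0 (k : Int) 1).map f = (List.range k).map (fun i : Nat => f (i : Int)) := by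
  rw [PySem.List.pyRange_zero_natCast, List.map_map]
  rfl

theorem loopA_eq_helperB (q : List String) (h1 : 1 ≤ q.length) :
    PySem.List.pyGetD (findContestMatchLoopA q (q.length : Int)) 0 "" =
      findContestMatchHelperB q := by
  rw [findContestMatchLoopA, findContestMatchHelperB]
  by_cases h : q.length ≤ 1
  · have hn : ¬ ((q.length : Int) > 1) := by omega
    simp only [hn, dif_neg, h, dif_pos, not_false_iff]
    rw [PySem.List.pyGetD_zero]
    cases q with
    | nil => simp at h1
    | cons a t => rfl
  · have hn : (q.length : Int) > 1 := by omega
    have hfd : PySem.Int.floordiv (q.length : Int) 2 = ((q.length / 2 : Nat) : Int) := by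
      exact_mod_cast PySem.Int.floordiv_natCast q.length 2
    simp only [hn, dif_pos, h, dif_neg, not_false_iff, hfd]
    have hmap :
        (PySem.List.pyRange 0 ((q.length / 2 : Nat) : Int) 1).map (fun i =>
            "(" ++ PySem.List.pyGetD q i "" ++ "," ++
              PySem.List.pyGetD q ((q.length : Int) - i - 1) "" ++ ")")
          = (List.range (q.length / 2)).map (fun i =>
            "(" ++ q.getD i "" ++ "," ++ q.getD (q.length - 1 - i) "" ++ ")") := by
      rw [map_pyRange_cast]
      apply List.map_congr_left
      intro i hi
      have hi' : i < q.length / 2 := List.mem_range.mp hi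
      have e1 : PySem.List.pyGetD q (i : Int) "" = q.getD i "" :=
        PySem.List.pyGetD_natCast q i ""
      have e2 : (q.length : Int) - (i : Int) - 1 = ((q.length - 1 - i : Nat) : Int) := by
        omega
      rw [e1, e2, PySem.List.pyGetD_natCast]
    rw [hmap]
    have hlen : ((List.range (q.length / 2)).map (fun i =>
        "(" ++ q.getD i "" ++ "," ++ q.getD (q.length - 1 - i) "" ++ ")")).length
        = q.length / 2 := by simp
    have := loopA_eq_helperB ((List.range (q.length / 2)).map (fun i =>
        "(" ++ q.getD i "" ++ "," ++ q.getD (q.length - 1 - i) "" ++ ")")) (by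
      rw [hlen]; omega)
    rw [hlen] at this
    exact this
termination_by q.length
decreasing_by
  simp
  omega

theorem findContestMatch_spec' (n : Int) (hn : 2 ≤ n) :
    findContestMatch n = findContestMatch_alt n := by
  rw [findContestMatch, findContestMatch_alt]
  have hfd0 : 0 ≤ PySem.Int.floordiv n 2 := by
    have := PySem.Int.floordiv_eq_ediv_of_pos (a := n) (b := 2) (by omega)
    omega
  have hcast : PySem.Int.floordiv n 2 = (((PySem.Int.floordiv n 2).toNat : Nat) : Int) := by
    omega
  have hmap :
      (PySem.List.pyRange 0 (PySem.Int.floordiv n 2) 1).map (fun i =>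
          "(" ++ PySem.Int.toStr (i + 1) ++ "," ++ PySem.Int.toStr (n - i) ++ ")")
        = (List.range ((PySem.Int.floordiv n 2).toNat)).map (fun (i : Nat) =>
          "(" ++ PySem.Int.toStr ((i : Int) + 1) ++ "," ++ PySem.Int.toStr (n - (i : Int)) ++ ")") := by
    rw [hcast, map_pyRange_cast]
    simp
    have hm : max (n / 2) 0 = n / 2 := by omega
    rw [hm]
  rw [hmap]
  have hlen : ((List.range ((PySem.Int.floordiv n 2).toNat)).map (fun (i : Nat) =>
      "(" ++ PySem.Int.toStr ((i : Int) + 1) ++ "," ++ PySem.Int.toStr (n - (i : Int)) ++ ")")).length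
      = (PySem.Int.floordiv n 2).toNat := by simp
  have h1 : 1 ≤ (PySem.Int.floordiv n 2).toNat := by
    have := PySem.Int.floordiv_eq_ediv_of_pos (a := n) (b := 2) (by omega)
    omega
  have := loopA_eq_helperB ((List.range ((PySem.Int.floordiv n 2).toNat)).map (fun (i : Nat) =>
      "(" ++ PySem.Int.toStr ((i : Int) + 1) ++ "," ++ PySem.Int.toStr (n - (i : Int)) ++ ")"))
      (by rw [hlen]; exact h1)
  rw [hlen] at this
  rw [← hcast] at this
  exact this

-- ===== VERDICT (by name: the statement is the Claim_ definition above) =====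
theorem findContestMatch_spec : Claim_equal_findContestMatch := by
  intro n _ hpre
  exact findContestMatch_spec' n hpre
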